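-- pv_equiv track=rewrite | github.com/christianrosdahl/aoc2024 | day22.py | generate_secret_number
-- ===== SOURCE A (Python) =====
-- import math
--
-- def generate_secret_number(initial_number, num_generations=1):
--     prune_number = 16777216
--     num = initial_number
--     for _ in range(num_generations):
--         num = ((num * 64) ^ num) % prune_number
--         num = (math.floor(num / 32) ^ num) % prune_number
--         num = ((num * 2048) ^ num) % prune_number
--     return num
-- ===== SOURCE B (Python) =====
-- def generate_secret_number(initial_number, num_generations=1):
--     # One PRNG step is linear over GF(2) on the 24-bit state, so n steps are
--     # one 24x24 GF(2) matrix power (columns stored as bitmasks), computed by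
--     # squaring: O(log n) matrix ops instead of n PRNG steps.
--     if num_generations <= 0:
--         return initial_number
--     prune_number = 16777216
--
--     def step(x):
--         x = (x ^ (x << 6)) % prune_number
--         x = x ^ (x >> 5)
--         return (x ^ (x << 11)) % prune_number
--
--     def apply(m, v):
--         acc = 0
--         for col in m:
--             if v & 1 == 1:
--                 acc ^= col
--             v >>= 1
--         return acc
--
--     def matmul(a, b):
--         return [apply(a, c) for c in b]
--
--     def powloop(result, base, n):
--         while n > 0:
--             if n % 2 == 1:
--                 result = matmul(result, base)
--             base = matmul(base, base)
--             n //= 2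
--         return result
--
--     identity = [1 << j for j in range(24)]
--     base = [step(1 << j) for j in range(24)]
--     m = powloop(identity, base, num_generations)
--     return apply(m, initial_number % prune_number)
-- ===== Notes on version B (the rewrite author's own statement) =====
-- stated objective: faster
-- what changed: B replaces the n-step PRNG loop by exponentiation-by-squaring of the 24x24 GF(2) matrix of one step (columns stored as bitmasks), O(log n) matrix multiplications instead of O(n) PRNG steps.
import Mathlib
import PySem

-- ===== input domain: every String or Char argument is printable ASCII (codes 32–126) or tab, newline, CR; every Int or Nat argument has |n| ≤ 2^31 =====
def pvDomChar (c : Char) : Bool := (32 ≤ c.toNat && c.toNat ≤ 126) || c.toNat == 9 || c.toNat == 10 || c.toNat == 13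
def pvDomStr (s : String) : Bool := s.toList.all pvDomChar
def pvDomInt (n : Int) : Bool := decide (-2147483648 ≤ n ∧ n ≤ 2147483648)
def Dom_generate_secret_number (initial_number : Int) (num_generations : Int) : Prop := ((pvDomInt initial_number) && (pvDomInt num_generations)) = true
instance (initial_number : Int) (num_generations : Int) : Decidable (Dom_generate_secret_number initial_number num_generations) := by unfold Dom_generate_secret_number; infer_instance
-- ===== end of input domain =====

-- B replaces A's n-step PRNG loop by a GF(2) 24x24 matrix power computed by squaring (measured faster).

-- ===== PORT A =====
-- Literal port of A's loop. math.floor(num/32) is ported as floor division: its argument is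
-- always a prior % 16777216 result, so the Python float division is exact and floor(num/32) == num // 32.
def generate_secret_number (initial_number : Int) (num_generations : Int) : Int :=
  (PySem.List.pyRange 0 num_generations 1).foldl
    (fun num _ =>
      let num1 := PySem.Int.mod (PySem.Int.bxor (num * 64) num) 16777216
      let num2 := PySem.Int.mod (PySem.Int.bxor (PySem.Int.floordiv num1 32) num1) 16777216
      PySem.Int.mod (PySem.Int.bxor (num2 * 2048) num2) 16777216)
    initial_number

-- ===== PORT B =====
-- Port of Source B. Every Python int inside B's helpers is nonnegative (24-bit states, bitmask
-- columns, a positive loop counter), so they are ported on Nat; ^^^ / <<< / >>> / % / &&& are exact there.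
def pvStep (x : Nat) : Nat :=
  let a := (x ^^^ (x <<< 6)) % 16777216
  let b := a ^^^ (a >>> 5)
  (b ^^^ (b <<< 11)) % 16777216

def pvApply (m : List Nat) (v : Nat) : Nat :=
  (m.foldl (fun (p : Nat × Nat) col =>
      ((if p.2 &&& 1 = 1 then p.1 ^^^ col else p.1), p.2 >>> 1)) (0, v)).1

def pvMatmul (a b : List Nat) : List Nat := b.map (fun c => pvApply a c)

def pvPowLoop (result base : List Nat) (n : Nat) : List Nat :=
  if n = 0 then result
  else pvPowLoop (if n % 2 = 1 then pvMatmul result base else result) (pvMatmul base base) (n / 2)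
termination_by n
decreasing_by exact Nat.div_lt_self (by omega) (by omega)

def generate_secret_number_alt (initial_number : Int) (num_generations : Int) : Int :=
  if num_generations ≤ 0 then initial_number
  else
    let identity := (List.range 24).map (fun j => 1 <<< j)
    let base := (List.range 24).map (fun j => pvStep (1 <<< j))
    let m := pvPowLoop identity base num_generations.toNat
    ((pvApply m ((PySem.Int.mod initial_number 16777216).toNat) : Nat) : Int)

-- ===== PRECONDITION & SPEC =====
def Spec_generate_secret_number (initial_number : Int) (num_generations : Int) (out : Int) : Prop := out = generate_secret_number_alt initial_number num_generations
instance (initial_number : Int) (num_generations : Int) (out : Int) : Decidable (Spec_generate_secret_number initial_number num_generations out) := by unfold Spec_generate_secret_number; infer_instance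

-- ===== CLAIM (what is proved, stated in full; the proofs are below) =====
def Claim_equal_generate_secret_number : Prop := ∀ (initial_number : Int) (num_generations : Int), Dom_generate_secret_number initial_number num_generations → Spec_generate_secret_number initial_number num_generations (generate_secret_number initial_number num_generations)

-- ===== LEMMAS AND PROOFS =====

-- generic Nat bit lemmas
theorem pvXorShiftLeft (x y k : Nat) : (x ^^^ y) <<< k = x <<< k ^^^ y <<< k := by
  apply Nat.eq_of_testBit_eq; intro i
  simp only [Nat.testBit_shiftLeft, Nat.testBit_xor]
  by_cases h : i ≥ k <;> simp [h]

theorem pvXorShiftRight (x y k : Nat) : (x ^^^ y) >>> k = x >>> k ^^^ y >>> k := by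
  apply Nat.eq_of_testBit_eq; intro i
  simp [Nat.testBit_shiftRight, Nat.testBit_xor]

theorem pvXorMod (x y n : Nat) : (x ^^^ y) % 2^n = x % 2^n ^^^ y % 2^n := by
  apply Nat.eq_of_testBit_eq; intro i
  simp only [Nat.testBit_mod_two_pow, Nat.testBit_xor]
  by_cases h : i < n <;> simp [h]

theorem pvXorDivTwo (x y : Nat) : (x ^^^ y) / 2 = x / 2 ^^^ y / 2 := by
  have h : ∀ z : Nat, z / 2 = z >>> 1 := fun z => by simp [Nat.shiftRight_eq_div_pow]
  rw [h, h, h]; exact pvXorShiftRight x y 1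

theorem pvTwoMulAddXor (a b c d : Nat) (hc : c < 2) (hd : d < 2) :
    (2*a+c) ^^^ (2*b+d) = 2*(a^^^b) + (c^^^d) := by
  apply Nat.eq_of_testBit_eq; intro i
  cases i with
  | zero =>
    simp only [Nat.testBit_zero, decide_eq_decide]
    have h : ∀ u v : Nat, (u ^^^ v) % 2 = u % 2 ^^^ v % 2 := fun u v => by
      simpa using pvXorMod u v 1
    rw [h]
    have h1 : (2*a+c)%2 = c := by omega
    have h2 : (2*b+d)%2 = d := by omega
    have h3 : (2*(a^^^b)+(c^^^d))%2 = (c^^^d) % 2 := by omega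
    have hc2 : c % 2 = c := by omega
    have hd2 : d % 2 = d := by omega
    rw [h1, h2, h3, h c d, hc2, hd2]
  | succ j =>
    rw [Nat.testBit_succ, Nat.testBit_succ, pvXorDivTwo]
    have h1 : (2*a+c)/2 = a := by omega
    have h2 : (2*b+d)/2 = b := by omega
    have h3 : (2*(a^^^b)+(c^^^d))/2 = a ^^^ b := by
      have : c ^^^ d < 2 := by interval_cases c <;> interval_cases d <;> decide
      omega
    rw [h1, h2, h3]

theorem pvTwoMulXor (a b : Nat) : (2*a) ^^^ (2*b) = 2*(a ^^^ b) := by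
  have := pvTwoMulAddXor a b 0 0 (by omega) (by omega)
  simpa using this

-- 2^k * m ^^^ y = 2^k * m + y for y < 2^k (disjoint bits)
theorem pvPowMulXor : ∀ (k m y : Nat), y < 2^k → (2^k * m) ^^^ y = 2^k * m + y := by
  intro k
  induction k with
  | zero => intro m y hy; interval_cases y; simp
  | succ j ih =>
    intro m y hy
    have h1 : 2^(j+1) * m = 2 * (2^j * m) + 0 := by ring
    have h2 : y = 2 * (y/2) + y % 2 := by omega
    rw [h1]
    conv_lhs => rw [h2]
    rw [pvTwoMulAddXor _ _ _ _ (by omega) (by omega)]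
    have hy2 : y / 2 < 2^j := by
      have : 2^(j+1) = 2*2^j := by ring
      omega
    rw [ih _ _ hy2]
    have h0 : (0:Nat) ^^^ y % 2 = y % 2 := by simp
    rw [h0]
    omega

-- (2^n - 1) ^^^ x = 2^n - 1 - x for x < 2^n  (bit complement)
theorem pvMaskXor : ∀ (n : Nat), ∀ x : Nat, x < 2^n → (2^n - 1) ^^^ x = 2^n - 1 - x := by
  intro n
  induction n with
  | zero => intro x hx; interval_cases x; decide
  | succ k ih =>
    intro x hx
    have hM : 2^(k+1) = 2*2^k := by ring
    have hx2 : x / 2 < 2^k := by omega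
    have h1 : (1 : Nat) ≤ 2^k := Nat.one_le_two_pow
    have hd : 2^(k+1) - 1 = 2*(2^k - 1) + 1 := by omega
    have hxd : x = 2*(x/2) + x%2 := by omega
    rw [hd]
    conv_lhs => rw [hxd]
    rw [pvTwoMulAddXor _ _ _ _ (by omega) (by omega), ih _ hx2]
    have hb : (1 : Nat) ^^^ x % 2 = 1 - x % 2 := by
      have : x % 2 = 0 ∨ x % 2 = 1 := by omega
      rcases this with h | h <;> rw [h] <;> decide
    rw [hb]
    omega

-- recursion view of pvApply
def pvApplyR : List Nat → Nat → Nat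
  | [], _ => 0
  | c :: m, v => (if v &&& 1 = 1 then c else 0) ^^^ pvApplyR m (v >>> 1)

theorem pvApply_foldl (m : List Nat) : ∀ (acc v : Nat),
    (m.foldl (fun (p : Nat × Nat) col =>
      ((if p.2 &&& 1 = 1 then p.1 ^^^ col else p.1), p.2 >>> 1)) (acc, v)).1
    = acc ^^^ pvApplyR m v := by
  induction m with
  | nil => intro acc v; simp [pvApplyR]
  | cons c m ih =>
    intro acc v
    simp only [List.foldl_cons, pvApplyR]
    by_cases hb : v &&& 1 = 1 <;> simp only [hb, if_true, if_false, ih] <;> simp [Nat.xor_assoc]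

theorem pvApply_eq_R (m : List Nat) (v : Nat) : pvApply m v = pvApplyR m v := by
  unfold pvApply
  rw [pvApply_foldl]
  simp

theorem pvR_zero (m : List Nat) : pvApplyR m 0 = 0 := by
  induction m with
  | nil => rfl
  | cons c m ih => simp [pvApplyR, ih]

theorem pvR_linear (m : List Nat) : ∀ (x y : Nat),
    pvApplyR m (x ^^^ y) = pvApplyR m x ^^^ pvApplyR m y := by
  induction m with
  | nil => intro x y; simp [pvApplyR]
  | cons c m ih =>
    intro x y
    have hb : (x ^^^ y) &&& 1 = (x &&& 1) ^^^ (y &&& 1) := by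
      rw [Nat.and_one_is_mod, Nat.and_one_is_mod, Nat.and_one_is_mod]
      simpa using pvXorMod x y 1
    have hs : (x ^^^ y) >>> 1 = x >>> 1 ^^^ y >>> 1 := pvXorShiftRight x y 1
    simp only [pvApplyR, hb, hs, ih]
    have hx : x &&& 1 = 0 ∨ x &&& 1 = 1 := by rw [Nat.and_one_is_mod]; omega
    have hy : y &&& 1 = 0 ∨ y &&& 1 = 1 := by rw [Nat.and_one_is_mod]; omega
    rcases hx with hx | hx <;> rcases hy with hy | hy <;>
      simp [hx, hy, Nat.xor_comm, Nat.xor_left_comm]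

theorem pvR_map (h : Nat → Nat) (h0 : h 0 = 0)
    (hlin : ∀ x y, h (x ^^^ y) = h x ^^^ h y) (m : List Nat) : ∀ v,
    pvApplyR (m.map h) v = h (pvApplyR m v) := by
  induction m with
  | nil => intro v; simp [pvApplyR, h0]
  | cons c m ih =>
    intro v
    simp only [List.map_cons, pvApplyR, ih, hlin]
    congr 1
    split <;> simp [h0]

-- pvApplyR on the identity columns selects the low k bits
theorem pvR_basis : ∀ (k : Nat), ∀ v : Nat,
    pvApplyR ((List.range k).map (fun j => 2^j)) v = v % 2^k := by
  intro k
  induction k with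
  | zero => intro v; simp [pvApplyR, Nat.mod_one]
  | succ k ih =>
    intro v
    rw [List.range_succ_eq_map]
    simp only [List.map_cons, List.map_map]
    have hcomp : ((fun j : Nat => (2:Nat)^j) ∘ Nat.succ) = (fun c => 2 * c) ∘ (fun j : Nat => 2^j) := by
      funext j; simp [Function.comp, pow_succ]; ring
    rw [hcomp, ← List.map_map]
    simp only [pvApplyR]
    rw [pvR_map (fun c => 2 * c) (by simp) (fun x y => (pvTwoMulXor x y).symm), ih]
    have hv2 : v >>> 1 = v / 2 := by simp [Nat.shiftRight_eq_div_pow]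
    have hb : v &&& 1 = v % 2 := Nat.and_one_is_mod v
    have hmod : v % 2^(k+1) = 2 * (v / 2 % 2^k) + v % 2 := by
      have h1 : 2^(k+1) = 2 * 2^k := by ring
      rw [h1, Nat.mod_mul]
      omega
    have hxor : (if v % 2 = 1 then (2:Nat)^0 else 0) ^^^ 2 * (v / 2 % 2^k)
        = 2 * (v / 2 % 2^k) + (if v % 2 = 1 then 1 else 0) := by
      have h2 : (if v % 2 = 1 then (2:Nat)^0 else 0) = (if v % 2 = 1 then 1 else 0) := by
        split <;> rfl
      rw [h2, Nat.xor_comm]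
      have h3 : 2 * (v / 2 % 2^k) = 2^1 * (v / 2 % 2^k) := by ring
      rw [h3, pvPowMulXor 1 _ _ (by split <;> omega)]
    rw [hb, hv2, hxor, hmod]
    split <;> omega

theorem pvStep_lt (x : Nat) : pvStep x < 16777216 := by
  simp only [pvStep]
  omega

theorem pvStep_zero : pvStep 0 = 0 := by decide

theorem pvStep_linear (x y : Nat) : pvStep (x ^^^ y) = pvStep x ^^^ pvStep y := by
  have h24 : (16777216 : Nat) = 2^24 := by norm_num
  have hmod : ∀ u v : Nat, (u ^^^ v) % 16777216 = u % 16777216 ^^^ v % 16777216 := fun u v => by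
    rw [h24]; exact pvXorMod u v 24
  simp only [pvStep]
  have ha : ((x ^^^ y) ^^^ (x ^^^ y) <<< 6) % 16777216
      = ((x ^^^ x <<< 6) % 16777216) ^^^ ((y ^^^ y <<< 6) % 16777216) := by
    rw [← hmod]
    congr 1
    rw [pvXorShiftLeft]
    simp [Nat.xor_assoc, Nat.xor_comm, Nat.xor_left_comm]
  rw [ha]
  set a1 := (x ^^^ x <<< 6) % 16777216 with ha1
  set a2 := (y ^^^ y <<< 6) % 16777216 with ha2
  have hb : (a1 ^^^ a2) ^^^ (a1 ^^^ a2) >>> 5 = (a1 ^^^ a1 >>> 5) ^^^ (a2 ^^^ a2 >>> 5) := by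
    rw [pvXorShiftRight]
    simp [Nat.xor_comm, Nat.xor_left_comm]
  rw [hb]
  set b1 := a1 ^^^ a1 >>> 5 with hb1
  set b2 := a2 ^^^ a2 >>> 5 with hb2
  rw [← hmod]
  congr 1
  rw [pvXorShiftLeft]
  simp [Nat.xor_comm, Nat.xor_left_comm]

-- matrix semantics
theorem pvMatmul_sem (a b : List Nat) (v : Nat) :
    pvApply (pvMatmul a b) v = pvApply a (pvApply b v) := by
  unfold pvMatmul
  rw [pvApply_eq_R (List.map (fun c => pvApply a c) b) v]
  have h0 : pvApply a 0 = 0 := by rw [pvApply_eq_R]; exact pvR_zero a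
  have hlin : ∀ x y, pvApply a (x ^^^ y) = pvApply a x ^^^ pvApply a y := by
    intro x y
    rw [pvApply_eq_R, pvApply_eq_R, pvApply_eq_R]; exact pvR_linear a x y
  rw [pvR_map (fun c => pvApply a c) h0 hlin b v, ← pvApply_eq_R b v]

theorem pvPowLoop_sem : ∀ (n : Nat) (r b : List Nat) (v : Nat),
    pvApply (pvPowLoop r b n) v = pvApply r ((fun x => pvApply b x)^[n] v) := by
  intro n
  induction n using Nat.strong_induction_on with
  | _ n ih =>
    intro r b v
    rw [pvPowLoop]
    by_cases h0 : n = 0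
    · simp [h0]
    · simp only [h0, if_false]
      rw [ih (n/2) (Nat.div_lt_self (by omega) (by omega))]
      have hbb : (fun x => pvApply (pvMatmul b b) x) = (fun x => pvApply b x)^[2] := by
        funext x
        simp [pvMatmul_sem, Function.iterate_succ_apply']
      rw [hbb, ← Function.iterate_mul]
      by_cases hodd : n % 2 = 1
      · simp only [if_pos hodd]
        rw [pvMatmul_sem]
        have hstep : pvApply b ((fun x => pvApply b x)^[2 * (n/2)] v)
            = (fun x => pvApply b x)^[2 * (n/2) + 1] v :=
          (Function.iterate_succ_apply' (fun x => pvApply b x) (2 * (n/2)) v).symm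
        rw [hstep]
        have h2 : 2 * (n/2) + 1 = n := by omega
        rw [h2]
      · simp only [if_neg hodd]
        have h2 : 2 * (n/2) = n := by omega
        rw [h2]

-- A's loop body, named (definitionally A's foldl body; used only in proofs)
def pvStepA (num : Int) : Int :=
  let num1 := PySem.Int.mod (PySem.Int.bxor (num * 64) num) 16777216
  let num2 := PySem.Int.mod (PySem.Int.bxor (PySem.Int.floordiv num1 32) num1) 16777216
  PySem.Int.mod (PySem.Int.bxor (num2 * 2048) num2) 16777216

-- tail of A's loop body (substeps 2 and 3), on Int and on Nat
def pvTailI (num1 : Int) : Int :=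
  let num2 := PySem.Int.mod (PySem.Int.bxor (PySem.Int.floordiv num1 32) num1) 16777216
  PySem.Int.mod (PySem.Int.bxor (num2 * 2048) num2) 16777216

def pvTailN (s1 : Nat) : Nat :=
  let s2 := (s1/32 ^^^ s1) % 16777216
  (s2*2048 ^^^ s2) % 16777216

def pvStepANat (v : Nat) : Nat := pvTailN ((v*64 ^^^ v) % 16777216)

theorem pvStepA_tail (i : Int) :
    pvStepA i = pvTailI (PySem.Int.mod (PySem.Int.bxor (i * 64) i) 16777216) := rfl

theorem pvModN (m : Nat) : PySem.Int.mod (m : Int) 16777216 = ((m % 16777216 : Nat) : Int) := by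
  rw [PySem.Int.mod_eq_emod_of_pos (by norm_num)]
  push_cast
  ring

theorem pvFloordivN (m : Nat) : PySem.Int.floordiv (m : Int) 32 = ((m / 32 : Nat) : Int) := by
  exact_mod_cast PySem.Int.floordiv_natCast m 32

theorem pvTail_cast (s : Nat) : pvTailI (s : Int) = ((pvTailN s : Nat) : Int) := by
  simp only [pvTailI, pvTailN]
  rw [pvFloordivN, PySem.Int.bxor_natCast, pvModN]
  rw [show ((((s/32 ^^^ s) % 16777216 : Nat) : Int) * 2048) = (((s/32 ^^^ s) % 16777216) * 2048 : Nat) from by push_cast; ring]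
  rw [PySem.Int.bxor_natCast, pvModN]

theorem pvStepA_natCast (v : Nat) : pvStepA (v : Int) = ((pvStepANat v : Nat) : Int) := by
  rw [pvStepA_tail, pvStepANat]
  rw [show ((v:Int) * 64) = ((v * 64 : Nat) : Int) from by push_cast; ring]
  rw [PySem.Int.bxor_natCast, pvModN, pvTail_cast]

theorem pvStepANat_eq (v : Nat) : pvStepANat v = pvStep (v % 16777216) := by
  have h24 : (16777216:Nat) = 2^24 := by norm_num
  have hmod : ∀ u w : Nat, (u ^^^ w) % 16777216 = u % 16777216 ^^^ w % 16777216 := fun u w => by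
    rw [h24]; exact pvXorMod u w 24
  simp only [pvStepANat, pvTailN, pvStep]
  have e1 : (v*64 ^^^ v) % 16777216 = ((v % 16777216) ^^^ (v % 16777216) <<< 6) % 16777216 := by
    rw [hmod, hmod]
    have a1 : (v*64) % 16777216 = ((v % 16777216) <<< 6) % 16777216 := by
      rw [Nat.shiftLeft_eq]
      have h6 : (2:Nat)^6 = 64 := by norm_num
      rw [h6, Nat.mod_mul_mod]
    have a2 : (v % 16777216) % 16777216 = v % 16777216 := by omega
    rw [a1, a2, Nat.xor_comm]
  rw [e1]
  set a := ((v % 16777216) ^^^ (v % 16777216) <<< 6) % 16777216 with hadef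
  have halt : a < 16777216 := by rw [hadef]; omega
  have e2 : (a/32 ^^^ a) % 16777216 = a ^^^ a >>> 5 := by
    have hsr : a >>> 5 = a / 32 := by rw [Nat.shiftRight_eq_div_pow]
    rw [Nat.xor_comm, ← hsr]
    apply Nat.mod_eq_of_lt
    rw [h24]
    exact Nat.xor_lt_two_pow (by omega) (by rw [hsr]; omega)
  rw [e2]
  have e3 : ∀ c : Nat, (c*2048 ^^^ c) % 16777216 = (c ^^^ c <<< 11) % 16777216 := by
    intro c
    rw [hmod (c*2048) c, hmod c (c <<< 11)]
    have l1 : (c*2048) % 16777216 = (c <<< 11) % 16777216 := by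
      rw [Nat.shiftLeft_eq]
    rw [l1, Nat.xor_comm]
  exact e3 (a ^^^ a >>> 5)

theorem pvModNegN (m : Nat) :
    PySem.Int.mod (-(m : Int) - 1) 16777216 = ((16777215 - m % 16777216 : Nat) : Int) := by
  rw [PySem.Int.mod_eq_emod_of_pos (by norm_num)]
  have hml : m % 16777216 < 16777216 := by omega
  have key : (-(m : Int) - 1) = ((16777215 - m % 16777216 : Nat) : Int) + 16777216 * (-((m / 16777216 : Nat) : Int) - 1) := by
    rw [Nat.cast_sub (by omega : m % 16777216 ≤ 16777215)]
    push_cast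
    have := Nat.div_add_mod m 16777216
    omega
  rw [key, Int.add_mul_emod_self_left]
  apply Int.emod_eq_of_lt
  · exact Int.natCast_nonneg _
  · have : (16777215 - m % 16777216 : Nat) < 16777216 := by omega
    exact_mod_cast this

-- the first substep of A on a negative input equals B's first substep on the reduced state
theorem pvNegFirst (m : Nat) :
    ((64*m + 63) ^^^ m) % 16777216
      = ((16777215 - m % 16777216) * 64 ^^^ (16777215 - m % 16777216)) % 16777216 := by
  have h24 : (16777216:Nat) = 2^24 := by norm_num
  have hmod : ∀ u w : Nat, (u ^^^ w) % 16777216 = u % 16777216 ^^^ w % 16777216 := fun u w => by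
    rw [h24]; exact pvXorMod u w 24
  have hml : m % 16777216 < 2^24 := by omega
  set m' := m % 16777216 with hm'
  have hwx : (16777215 - m' : Nat) = (2^24 - 1) ^^^ m' := by
    rw [pvMaskXor 24 m' hml]
    norm_num
  have hL : 64*m + 63 = (64*m) ^^^ 63 := by
    have h := pvPowMulXor 6 m 63 (by norm_num)
    norm_num at h
    exact h.symm
  rw [hL, hmod, hmod]
  rw [hwx]
  rw [show ((2^24 - 1 ^^^ m') * 64) = ((2^24 - 1 ^^^ m') <<< 6) from by rw [Nat.shiftLeft_eq]]
  rw [pvXorShiftLeft, hmod, hmod, hmod]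
  have c1 : (64*m) % 16777216 = (m' <<< 6) % 16777216 := by
    rw [Nat.shiftLeft_eq]
    have h6 : (2:Nat)^6 = 64 := by norm_num
    rw [h6, hm', Nat.mod_mul_mod, Nat.mul_comm]
  have c2 : (63:Nat) % 16777216 = 63 := by norm_num
  have c3 : m % 16777216 = m' := rfl
  have c4 : ((2:Nat)^24 - 1) <<< 6 % 16777216 = 16777152 := by norm_num [Nat.shiftLeft_eq]
  have c5 : ((2:Nat)^24 - 1) % 16777216 = 16777215 := by norm_num
  have c6 : m' % 16777216 = m' := by omega
  rw [c1, c2, c3, c4, c5, c6]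
  have swap : ∀ a b c d : Nat, (a ^^^ b) ^^^ (c ^^^ d) = (a ^^^ c) ^^^ (b ^^^ d) := by
    intros; simp [Nat.xor_comm, Nat.xor_left_comm]
  rw [swap 16777152 ((m' <<< 6) % 16777216) 16777215 m']
  have : (16777152 : Nat) ^^^ 16777215 = 63 := by decide
  rw [this]
  simp [Nat.xor_comm, Nat.xor_left_comm]

theorem pvStepA_eq (i : Int) :
    pvStepA i = ((pvStep ((PySem.Int.mod i 16777216).toNat) : Nat) : Int) := by
  by_cases hi : 0 ≤ i
  · obtain ⟨v, rfl⟩ : ∃ v : Nat, i = (v : Int) := ⟨i.toNat, by omega⟩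
    rw [pvStepA_natCast v, pvModN, Int.toNat_natCast, pvStepANat_eq]
  · obtain ⟨m, rfl⟩ : ∃ m : Nat, i = -(m : Int) - 1 := ⟨(-i-1).toNat, by omega⟩
    rw [pvModNegN, Int.toNat_natCast]
    rw [pvStepA_tail]
    have hneg1 : ¬ (0 : Int) ≤ (-(m:Int)-1) * 64 := by
      have : ((-(m:Int)-1) * 64) = -(64 * (m:Int)) - 64 := by ring
      rw [this]
      have := Int.natCast_nonneg m
      omega
    have hneg2 : ¬ (0 : Int) ≤ -(m:Int)-1 := by
      have := Int.natCast_nonneg m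
      omega
    have hbx : PySem.Int.bxor ((-(m:Int)-1) * 64) (-(m:Int)-1) = (((64*m+63) ^^^ m : Nat) : Int) := by
      simp only [PySem.Int.bxor]
      rw [if_neg hneg1, if_neg hneg2]
      have e1 : (-((-(m:Int)-1) * 64) - 1) = ((64*m + 63 : Nat) : Int) := by push_cast; ring
      have e2 : (-(-(m:Int)-1) - 1) = ((m : Nat) : Int) := by ring
      rw [e1, e2, Int.toNat_natCast, Int.toNat_natCast]
    rw [hbx, pvModN, pvNegFirst, pvTail_cast]
    rw [show pvTailN (((16777215 - m % 16777216)*64 ^^^ (16777215 - m % 16777216)) % 16777216)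
        = pvStepANat (16777215 - m % 16777216) from rfl]
    rw [pvStepANat_eq]
    have hred : (16777215 - m % 16777216) % 16777216 = 16777215 - m % 16777216 := by omega
    rw [hred]

theorem pvFoldlConst {α β : Type} (f : β → β) : ∀ (l : List α) (i : β),
    l.foldl (fun x _ => f x) i = f^[l.length] i := by
  intro l
  induction l with
  | nil => intro i; simp
  | cons a l ih => intro i; simp [ih, Function.iterate_succ_apply]

theorem pvA_as_iterate (i n : Int) :
    generate_secret_number i n = pvStepA^[(PySem.List.pyRange 0 n 1).length] i := by
  exact pvFoldlConst pvStepA (PySem.List.pyRange 0 n 1) i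

theorem pvIter_eq (i : Int) : ∀ (k : Nat),
    pvStepA^[k+1] i = ((pvStep^[k+1] ((PySem.Int.mod i 16777216).toNat) : Nat) : Int) := by
  intro k
  induction k with
  | zero => simpa using pvStepA_eq i
  | succ k ih =>
    rw [Function.iterate_succ_apply', ih, pvStepA_eq]
    conv_rhs => rw [Function.iterate_succ_apply' (f := pvStep)]
    set w := pvStep^[k+1] ((PySem.Int.mod i 16777216).toNat) with hw
    have hwlt : w < 16777216 := by
      rw [hw, Function.iterate_succ_apply']
      exact pvStep_lt _
    have hmodw : (PySem.Int.mod (w : Int) 16777216).toNat = w := by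
      rw [pvModN, Int.toNat_natCast]
      omega
    rw [hmodw]

theorem pvB_core (t : Nat) (v0 : Nat) (hv0 : v0 < 16777216) (ht : 1 ≤ t) :
    pvApply (pvPowLoop ((List.range 24).map (fun j => 1 <<< j))
        ((List.range 24).map (fun j => pvStep (1 <<< j))) t) v0
      = pvStep^[t] v0 := by
  rw [pvPowLoop_sem]
  have hbasis : ((List.range 24).map (fun j => (1:Nat) <<< j)) = (List.range 24).map (fun j => 2^j) := by
    apply List.map_congr_left
    intro j _
    rw [Nat.shiftLeft_eq, one_mul]
  have hid : ∀ x : Nat, pvApply ((List.range 24).map (fun j => (1:Nat) <<< j)) x = x % 16777216 := by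
    intro x
    rw [pvApply_eq_R, hbasis, pvR_basis]
    norm_num
  have hbase : ∀ x : Nat, pvApply ((List.range 24).map (fun j => pvStep ((1:Nat) <<< j))) x
      = pvStep (x % 16777216) := by
    intro x
    have hmm : ((List.range 24).map (fun j => pvStep ((1:Nat) <<< j)))
        = ((List.range 24).map (fun j => (1:Nat) <<< j)).map pvStep := by
      rw [List.map_map]
      rfl
    rw [hmm, pvApply_eq_R, pvR_map pvStep pvStep_zero pvStep_linear, ← pvApply_eq_R, hid]
  have hiter : ∀ k : Nat,
      (fun x => pvApply ((List.range 24).map (fun j => pvStep ((1:Nat) <<< j))) x)^[k] v0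
        = pvStep^[k] v0 ∧ pvStep^[k] v0 < 16777216 := by
    intro k
    induction k with
    | zero => exact ⟨rfl, hv0⟩
    | succ k ih =>
      constructor
      · rw [Function.iterate_succ_apply', Function.iterate_succ_apply', ih.1, hbase,
          Nat.mod_eq_of_lt ih.2]
      · rw [Function.iterate_succ_apply']
        exact pvStep_lt _
  rw [hid, (hiter t).1]
  obtain ⟨k, rfl⟩ : ∃ k, t = k + 1 := ⟨t - 1, by omega⟩
  rw [Function.iterate_succ_apply' (f := pvStep)]
  exact Nat.mod_eq_of_lt (pvStep_lt _)

-- ===== VERDICT (by name: the statement is the Claim_ definition above) =====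
theorem generate_secret_number_spec : Claim_equal_generate_secret_number := by
  intro i n _
  unfold Spec_generate_secret_number
  by_cases hn : n ≤ 0
  · rw [pvA_as_iterate, PySem.List.pyRange_one_eq_nil (by omega)]
    unfold generate_secret_number_alt
    rw [if_pos hn]
    rfl
  · have hn : 0 < n := by omega
    have hvlt : (PySem.Int.mod i 16777216).toNat < 16777216 := by
      have h1 := PySem.Int.mod_lt i (b := 16777216) (by norm_num)
      have h2 := PySem.Int.mod_nonneg i (b := 16777216) (by norm_num)
      omega
    rw [pvA_as_iterate, PySem.List.length_pyRange_one]
    have hlen : (n - 0).toNat = (n.toNat - 1) + 1 := by omega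
    rw [hlen, pvIter_eq]
    have hexp : n.toNat - 1 + 1 = n.toNat := by omega
    rw [hexp]
    unfold generate_secret_number_alt
    rw [if_neg (by omega)]
    exact (congrArg (fun z : Nat => (z : Int))
      (pvB_core n.toNat _ hvlt (by omega))).symm
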